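-- pv_equiv track=rewrite | github.com/markusleucht/perplexity-mcp | src/prompt_enrichment.py | is_pharma_query
-- ===== SOURCE A (Python) =====
-- DRUG_DATABASE = {
--     # Dermatology
--     "bimzelx": {"generic": "Bimekizumab", "manufacturer": "UCB", "class": "IL-17A/F Inhibitor"},
--     "cosentyx": {"generic": "Secukinumab", "manufacturer": "Novartis", "class": "IL-17A Inhibitor"},
--     "skyrizi": {"generic": "Risankizumab", "manufacturer": "AbbVie", "class": "IL-23 Inhibitor"},
--     "tremfya": {"generic": "Guselkumab", "manufacturer": "Janssen", "class": "IL-23 Inhibitor"},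
--     "humira": {"generic": "Adalimumab", "manufacturer": "AbbVie", "class": "TNF-alpha Inhibitor"},
--     "taltz": {"generic": "Ixekizumab", "manufacturer": "Lilly", "class": "IL-17A Inhibitor"},
--     "stelara": {"generic": "Ustekinumab", "manufacturer": "Janssen", "class": "IL-12/23 Inhibitor"},
--
--     # Diabetes/Obesity
--     "ozempic": {"generic": "Semaglutid", "manufacturer": "Novo Nordisk", "class": "GLP-1 Agonist"},
--     "wegovy": {"generic": "Semaglutid", "manufacturer": "Novo Nordisk", "class": "GLP-1 Agonist"},
--     "mounjaro": {"generic": "Tirzepatid", "manufacturer": "Lilly", "class": "GIP/GLP-1 Agonist"},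
--     "trulicity": {"generic": "Dulaglutid", "manufacturer": "Lilly", "class": "GLP-1 Agonist"},
--     "jardiance": {"generic": "Empagliflozin", "manufacturer": "Boehringer Ingelheim", "class": "SGLT2 Inhibitor"},
--     "forxiga": {"generic": "Dapagliflozin", "manufacturer": "AstraZeneca", "class": "SGLT2 Inhibitor"},
--
--     # Oncology
--     "keytruda": {"generic": "Pembrolizumab", "manufacturer": "MSD", "class": "PD-1 Inhibitor"},
--     "opdivo": {"generic": "Nivolumab", "manufacturer": "BMS", "class": "PD-1 Inhibitor"},
--     "tecentriq": {"generic": "Atezolizumab", "manufacturer": "Roche", "class": "PD-L1 Inhibitor"},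
--     "imfinzi": {"generic": "Durvalumab", "manufacturer": "AstraZeneca", "class": "PD-L1 Inhibitor"},
--
--     # Cardiology
--     "entresto": {"generic": "Sacubitril/Valsartan", "manufacturer": "Novartis", "class": "ARNI"},
--     "eliquis": {"generic": "Apixaban", "manufacturer": "BMS/Pfizer", "class": "DOAC"},
--     "xarelto": {"generic": "Rivaroxaban", "manufacturer": "Bayer", "class": "DOAC"},
-- }
--
-- def is_pharma_query(query: str) -> bool:
--     """Detect if query is pharmaceutical/healthcare related."""
--     pharma_indicators = [
--         "drug", "medication", "pharma", "therapeutic", "clinical",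
--         "patient", "treatment", "therapy", "indication", "approval",
--         "medikament", "arzneimittel", "therapie", "behandlung",
--         "zulassung", "markt", "verschreiber", "facharzt",
--     ]
--     query_lower = query.lower()
--
--     # Check for known drugs
--     for drug in DRUG_DATABASE.keys():
--         if drug in query_lower:
--             return True
--
--     # Check for pharma indicators
--     for indicator in pharma_indicators:
--         if indicator in query_lower:
--             return True
--
--     return False
-- ===== SOURCE B (Python) =====
-- # B: position-major scan — for each starting position of the lowered query,
-- # check whether any pattern begins there (instead of A's pattern-major
-- # pattern-in-string substring scans).
-- _PATTERNS = [
--     "bimzelx", "cosentyx", "skyrizi", "tremfya", "humira", "taltz", "stelara",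
--     "ozempic", "wegovy", "mounjaro", "trulicity", "jardiance", "forxiga",
--     "keytruda", "opdivo", "tecentriq", "imfinzi",
--     "entresto", "eliquis", "xarelto",
--     "drug", "medication", "pharma", "therapeutic", "clinical",
--     "patient", "treatment", "therapy", "indication", "approval",
--     "medikament", "arzneimittel", "therapie", "behandlung",
--     "zulassung", "markt", "verschreiber", "facharzt",
-- ]
--
-- def is_pharma_query(query: str) -> bool:
--     """Detect if query is pharmaceutical/healthcare related."""
--     q = query.lower()
--     return any(q.startswith(p, i) for i in range(len(q) + 1) for p in _PATTERNS)
-- ===== Notes on version B (the rewrite author's own statement) =====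
-- stated objective: alternative
-- what changed: A scans pattern-by-pattern, running a full substring search of the lowered query for each pattern; B scans position-by-position over the lowered query, testing at each index whether any pattern starts there (quantifier order swapped), returning any() of a single generator.
import Mathlib
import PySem

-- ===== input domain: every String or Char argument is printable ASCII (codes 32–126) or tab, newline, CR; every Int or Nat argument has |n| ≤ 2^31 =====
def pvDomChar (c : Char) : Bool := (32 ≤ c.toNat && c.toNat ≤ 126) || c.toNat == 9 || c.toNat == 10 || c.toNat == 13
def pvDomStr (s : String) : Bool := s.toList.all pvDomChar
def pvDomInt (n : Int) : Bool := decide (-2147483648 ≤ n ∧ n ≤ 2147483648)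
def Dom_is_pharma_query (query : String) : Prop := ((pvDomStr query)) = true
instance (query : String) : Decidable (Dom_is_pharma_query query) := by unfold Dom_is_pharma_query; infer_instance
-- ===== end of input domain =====

-- B replaces A's pattern-major substring scans by a single position-major scan of the lowered query (alternative decomposition, same cost class).


-- ===== PORT A =====
def DRUG_DATABASE : PySem.Dict String (PySem.Dict String String) := PySem.Dict.mk [
  ("bimzelx", PySem.Dict.mk [("generic", "Bimekizumab"), ("manufacturer", "UCB"), ("class", "IL-17A/F Inhibitor")]),
  ("cosentyx", PySem.Dict.mk [("generic", "Secukinumab"), ("manufacturer", "Novartis"), ("class", "IL-17A Inhibitor")]),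
  ("skyrizi", PySem.Dict.mk [("generic", "Risankizumab"), ("manufacturer", "AbbVie"), ("class", "IL-23 Inhibitor")]),
  ("tremfya", PySem.Dict.mk [("generic", "Guselkumab"), ("manufacturer", "Janssen"), ("class", "IL-23 Inhibitor")]),
  ("humira", PySem.Dict.mk [("generic", "Adalimumab"), ("manufacturer", "AbbVie"), ("class", "TNF-alpha Inhibitor")]),
  ("taltz", PySem.Dict.mk [("generic", "Ixekizumab"), ("manufacturer", "Lilly"), ("class", "IL-17A Inhibitor")]),
  ("stelara", PySem.Dict.mk [("generic", "Ustekinumab"), ("manufacturer", "Janssen"), ("class", "IL-12/23 Inhibitor")]),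
  ("ozempic", PySem.Dict.mk [("generic", "Semaglutid"), ("manufacturer", "Novo Nordisk"), ("class", "GLP-1 Agonist")]),
  ("wegovy", PySem.Dict.mk [("generic", "Semaglutid"), ("manufacturer", "Novo Nordisk"), ("class", "GLP-1 Agonist")]),
  ("mounjaro", PySem.Dict.mk [("generic", "Tirzepatid"), ("manufacturer", "Lilly"), ("class", "GIP/GLP-1 Agonist")]),
  ("trulicity", PySem.Dict.mk [("generic", "Dulaglutid"), ("manufacturer", "Lilly"), ("class", "GLP-1 Agonist")]),
  ("jardiance", PySem.Dict.mk [("generic", "Empagliflozin"), ("manufacturer", "Boehringer Ingelheim"), ("class", "SGLT2 Inhibitor")]),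
  ("forxiga", PySem.Dict.mk [("generic", "Dapagliflozin"), ("manufacturer", "AstraZeneca"), ("class", "SGLT2 Inhibitor")]),
  ("keytruda", PySem.Dict.mk [("generic", "Pembrolizumab"), ("manufacturer", "MSD"), ("class", "PD-1 Inhibitor")]),
  ("opdivo", PySem.Dict.mk [("generic", "Nivolumab"), ("manufacturer", "BMS"), ("class", "PD-1 Inhibitor")]),
  ("tecentriq", PySem.Dict.mk [("generic", "Atezolizumab"), ("manufacturer", "Roche"), ("class", "PD-L1 Inhibitor")]),
  ("imfinzi", PySem.Dict.mk [("generic", "Durvalumab"), ("manufacturer", "AstraZeneca"), ("class", "PD-L1 Inhibitor")]),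
  ("entresto", PySem.Dict.mk [("generic", "Sacubitril/Valsartan"), ("manufacturer", "Novartis"), ("class", "ARNI")]),
  ("eliquis", PySem.Dict.mk [("generic", "Apixaban"), ("manufacturer", "BMS/Pfizer"), ("class", "DOAC")]),
  ("xarelto", PySem.Dict.mk [("generic", "Rivaroxaban"), ("manufacturer", "Bayer"), ("class", "DOAC")])]

def pharma_indicators : List String := [
  "drug", "medication", "pharma", "therapeutic", "clinical",
  "patient", "treatment", "therapy", "indication", "approval",
  "medikament", "arzneimittel", "therapie", "behandlung",
  "zulassung", "markt", "verschreiber", "facharzt"]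

-- the two early-return for-loops become short-circuiting List.any over the same lists
def is_pharma_query (query : String) : Bool :=
  let query_lower := PySem.Str.lower query
  if DRUG_DATABASE.keys.any (fun drug => PySem.Str.isIn drug query_lower) then true
  else if pharma_indicators.any (fun indicator => PySem.Str.isIn indicator query_lower) then true
  else false

-- ===== PORT B =====
def pvPatterns : List String := [
  "bimzelx", "cosentyx", "skyrizi", "tremfya", "humira", "taltz", "stelara",
  "ozempic", "wegovy", "mounjaro", "trulicity", "jardiance", "forxiga",
  "keytruda", "opdivo", "tecentriq", "imfinzi",
  "entresto", "eliquis", "xarelto",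
  "drug", "medication", "pharma", "therapeutic", "clinical",
  "patient", "treatment", "therapy", "indication", "approval",
  "medikament", "arzneimittel", "therapie", "behandlung",
  "zulassung", "markt", "verschreiber", "facharzt"]

-- any(q.startswith(p, i) for i in range(len(q)+1) for p in _PATTERNS); PySem has no startswith-with-start,
-- so q.startswith(p, i) (0 ≤ i) is ported exactly as startswith on the tail slice q[i:]
def is_pharma_query_alt (query : String) : Bool :=
  let q := PySem.Str.lower query
  (PySem.List.pyRange 0 ((q.toList.length : Int) + 1) 1).any (fun i =>
    pvPatterns.any (fun p =>
      PySem.Chars.startswith (PySem.List.slice q.toList (some i) none) p.toList))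

-- ===== PRECONDITION & SPEC =====
def Spec_is_pharma_query (query : String) (out : Bool) : Prop := out = is_pharma_query_alt query
instance (query : String) (out : Bool) : Decidable (Spec_is_pharma_query query out) := by unfold Spec_is_pharma_query; infer_instance

-- ===== CLAIM (what is proved, stated in full; the proofs are below) =====
def Claim_equal_is_pharma_query : Prop := ∀ (query : String), Dom_is_pharma_query query → Spec_is_pharma_query query (is_pharma_query query)

-- ===== LEMMAS AND PROOFS =====

-- position-major scan of one pattern over s equals the substring test
lemma any_startswith_eq_isIn (s p : List Char) :
    ((PySem.List.pyRange 0 ((s.length : Int) + 1) 1).any (fun i =>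
      PySem.Chars.startswith (PySem.List.slice s (some i) none) p))
    = PySem.Chars.isIn p s := by
  rw [Bool.eq_iff_iff, List.any_eq_true, ← PySem.Chars.exists_prefix_drop_iff_isIn]
  constructor
  · rintro ⟨i, hi, hsw⟩
    rw [PySem.List.mem_pyRange_one] at hi
    obtain ⟨k, rfl⟩ := Int.eq_ofNat_of_zero_le hi.1
    rw [PySem.List.slice_from_natCast, PySem.Chars.startswith_iff] at hsw
    exact ⟨k, hsw⟩
  · rintro ⟨j, hj⟩
    refine ⟨(min j s.length : Nat), ?_, ?_⟩
    · rw [PySem.List.mem_pyRange_one]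
      constructor
      · positivity
      · have := Nat.min_le_right j s.length
        omega
    · rw [PySem.List.slice_from_natCast, PySem.Chars.startswith_iff]
      rcases le_or_gt j s.length with h | h
      · simpa [min_eq_left h] using hj
      · have hnil : s.drop j = [] := List.drop_eq_nil_of_le (by omega)
        have hp : p = [] := List.prefix_nil.mp (hnil ▸ hj)
        simp [hp]

-- swapping the two `any`s
lemma any_swap {α β : Type} (l : List α) (m : List β) (g : α → β → Bool) :
    (l.any (fun a => m.any (fun b => g a b))) = (m.any (fun b => l.any (fun a => g a b))) := by
  rw [Bool.eq_iff_iff]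
  simp only [List.any_eq_true]
  tauto

-- ===== VERDICT (by name: the statement is the Claim_ definition above) =====
theorem is_pharma_query_spec : Claim_equal_is_pharma_query := by
  intro query _
  unfold Spec_is_pharma_query is_pharma_query is_pharma_query_alt
  rw [any_swap]
  simp only [any_startswith_eq_isIn]
  simp [DRUG_DATABASE, pharma_indicators, pvPatterns, PySem.Dict.keys, Bool.or_assoc]
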